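-- pv_equiv track=rewrite | github.com/Landdreamz/crm-system | scripts/crawl_county_parcels.py | normalize_properties
-- ===== SOURCE A (Python) =====
-- NORMALIZED_KEYS = {
--     "apn": ["apn", "parcelno", "parcel_no", "acct_id", "acct_num", "accountno", "pin", "parcel_id", "prop_id", "rprop_id", "rpardes", "hcad_num", "lowparcelid"],
--     "address": ["fulladdr", "site_address", "address", "prop_addr", "situs_addr", "location", "mail_addr_1", "site_str_num", "site_str_name", "site_str_sfx", "site_city", "site_zip"],
--     "owner": ["owner", "owner_name", "owner_name_1", "situs_owner", "mailname", "owner1"],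
--     "acres": ["acreage", "acres", "grossacres", "landacres", "calc_acres", "statedarea"],
--     "legal_desc": ["legaldesc", "legal_desc", "legaldescription", "legal_dscr_1", "dscr"],
--     "market_value": ["marketvalue", "total_value", "assessed_val", "tax_val", "appraisedvalue", "market_val", "total_market_val", "total_appraised_val"],
-- }
--
-- def normalize_properties(attrs):
--     """Map county attributes to a normalized parcel schema."""
--     if not attrs:
--         return {}
--     lower_map = {str(k).lower(): k for k in attrs}
--     out = {}
--     for norm_key, candidates in NORMALIZED_KEYS.items():
--         for c in candidates:
--             orig_key = lower_map.get(c)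
--             if orig_key is not None:
--                 val = attrs.get(orig_key)
--                 if val is not None and str(val).strip() != "":
--                     out[norm_key] = val
--                     break
--     # Keep any unmapped fields under "raw" or drop; here we add a few common ones to top level
--     for k, v in attrs.items():
--         if v is None or str(v).strip() == "":
--             continue
--         kl = k.lower()
--         if any(kl == c for cands in NORMALIZED_KEYS.values() for c in cands):
--             continue
--         if kl not in out:
--             out[k] = v
--     return out
-- ===== SOURCE B (Python) =====
-- NORMALIZED_KEYS = {
--     "apn": ["apn", "parcelno", "parcel_no", "acct_id", "acct_num", "accountno", "pin", "parcel_id", "prop_id", "rprop_id", "rpardes", "hcad_num", "lowparcelid"],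
--     "address": ["fulladdr", "site_address", "address", "prop_addr", "situs_addr", "location", "mail_addr_1", "site_str_num", "site_str_name", "site_str_sfx", "site_city", "site_zip"],
--     "owner": ["owner", "owner_name", "owner_name_1", "situs_owner", "mailname", "owner1"],
--     "acres": ["acreage", "acres", "grossacres", "landacres", "calc_acres", "statedarea"],
--     "legal_desc": ["legaldesc", "legal_desc", "legaldescription", "legal_dscr_1", "dscr"],
--     "market_value": ["marketvalue", "total_value", "assessed_val", "tax_val", "appraisedvalue", "market_val", "total_market_val", "total_appraised_val"],
-- }
--
-- # flattened reverse index: candidate (lowercase) -> (normalized key, priority)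
-- CAND_INDEX = {}
-- for _nk, _cands in NORMALIZED_KEYS.items():
--     for _i, _c in enumerate(_cands):
--         CAND_INDEX[_c] = (_nk, _i)
--
--
-- def normalize_properties(attrs):
--     """Map county attributes to a normalized parcel schema."""
--     # one pass: collect candidate hits (last case-duplicate wins) and the extras
--     hits = {}
--     extras = []
--     for k, v in attrs.items():
--         kl = k.lower()
--         if kl in CAND_INDEX:
--             hits[kl] = v
--         elif str(v).strip() != "":
--             extras.append((k, kl, v))
--     # per normalized key keep the hit of lowest priority with a non-empty value
--     best = {}
--     for c, v in hits.items():
--         if str(v).strip() == "":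
--             continue
--         nk, pr = CAND_INDEX[c]
--         if nk not in best or pr < best[nk][0]:
--             best[nk] = (pr, v)
--     out = {nk: best[nk][1] for nk in NORMALIZED_KEYS if nk in best}
--     for k, kl, v in extras:
--         if kl not in out:
--             out[k] = v
--     return out
-- ===== Notes on version B (the rewrite author's own statement) =====
-- stated objective: faster
-- what changed: Replaces A's lower_map plus nested norm-key/candidate scan (two dict lookups per candidate) and its re-filtering second pass by a flattened reverse index candidate->(norm_key,priority) built once at module level: a single pass over attrs splits items into candidate hits (last case-duplicate wins) and extras, a fold over the hits keeps the lowest-priority non-empty hit per normalized key, and the precomputed extras are appended.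
import Mathlib
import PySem

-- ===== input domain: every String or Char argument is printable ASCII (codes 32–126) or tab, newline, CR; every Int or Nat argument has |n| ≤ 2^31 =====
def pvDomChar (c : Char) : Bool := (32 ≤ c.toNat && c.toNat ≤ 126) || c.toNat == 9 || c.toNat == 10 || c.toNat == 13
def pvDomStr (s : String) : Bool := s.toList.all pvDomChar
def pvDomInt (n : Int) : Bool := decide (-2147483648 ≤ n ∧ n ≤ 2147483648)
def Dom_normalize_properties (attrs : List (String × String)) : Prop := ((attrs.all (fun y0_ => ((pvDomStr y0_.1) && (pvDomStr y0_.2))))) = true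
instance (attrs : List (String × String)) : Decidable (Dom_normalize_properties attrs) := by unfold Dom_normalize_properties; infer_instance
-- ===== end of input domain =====

-- B replaces A's lower_map + nested norm-key/candidate scan and re-filtering second pass by a
-- flattened reverse index candidate -> (norm_key, priority) and a single partitioning pass;
-- objective: faster (constant factor, measured).

-- ===== PORT A =====
def NORMALIZED_KEYS : List (String × List String) := [
  ("apn", ["apn", "parcelno", "parcel_no", "acct_id", "acct_num", "accountno", "pin", "parcel_id", "prop_id", "rprop_id", "rpardes", "hcad_num", "lowparcelid"]),
  ("address", ["fulladdr", "site_address", "address", "prop_addr", "situs_addr", "location", "mail_addr_1", "site_str_num", "site_str_name", "site_str_sfx", "site_city", "site_zip"]),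
  ("owner", ["owner", "owner_name", "owner_name_1", "situs_owner", "mailname", "owner1"]),
  ("acres", ["acreage", "acres", "grossacres", "landacres", "calc_acres", "statedarea"]),
  ("legal_desc", ["legaldesc", "legal_desc", "legaldescription", "legal_dscr_1", "dscr"]),
  ("market_value", ["marketvalue", "total_value", "assessed_val", "tax_val", "appraisedvalue", "market_val", "total_market_val", "total_appraised_val"])]

-- lower_map = {str(k).lower(): k for k in attrs}
def np_lowerMap (attrs : List (String × String)) : PySem.Dict String String :=
  attrs.foldl (fun d p => d.insert (PySem.Str.lower p.1) p.1) PySem.Dict.empty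

-- the inner `for c in candidates: … break` loop of A
def np_try (lm da : PySem.Dict String String) (nk : String)
    (out : PySem.Dict String String) : List String → PySem.Dict String String
  | [] => out
  | c :: rest =>
    match lm.get? c with
    | some orig =>
      match da.get? orig with
      | some val =>
        if PySem.Str.strip val ≠ "" then out.insert nk val
        else np_try lm da nk out rest
      | none => np_try lm da nk out rest
    | none => np_try lm da nk out rest

def normalize_properties (attrs : List (String × String)) : List (String × String) :=
  if attrs = [] then []
  else
    let lm := np_lowerMap attrs
    let da := PySem.Dict.mk attrs
    let out1 := NORMALIZED_KEYS.foldl (fun out p => np_try lm da p.1 out p.2) PySem.Dict.empty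
    let out2 := attrs.foldl (fun out p =>
      if PySem.Str.strip p.2 == "" then out
      else
        let kl := PySem.Str.lower p.1
        if NORMALIZED_KEYS.any (fun q => q.2.any (fun c => kl == c)) then out
        else if out.contains kl then out
        else out.insert p.1 p.2) out1
    out2.items

-- ===== PORT B =====
-- module-level reverse index: candidate -> (norm_key, priority)
def CAND_INDEX : PySem.Dict String (String × Int) :=
  NORMALIZED_KEYS.foldl
    (fun d p => (PySem.List.enumerate p.2).foldl (fun d ic => d.insert ic.2 (p.1, ic.1)) d)
    PySem.Dict.empty

-- one pass: candidate hits (last case-duplicate wins) and the extras, in order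
def npB_scan (attrs : List (String × String)) :
    PySem.Dict String String × List (String × String × String) :=
  attrs.foldl (fun st p =>
    let kl := PySem.Str.lower p.1
    if CAND_INDEX.contains kl then (st.1.insert kl p.2, st.2)
    else if PySem.Str.strip p.2 ≠ "" then (st.1, st.2 ++ [(p.1, kl, p.2)])
    else st) (PySem.Dict.empty, [])

-- per normalized key the hit of lowest priority with a non-empty value
def npB_best (hits : PySem.Dict String String) : PySem.Dict String (Int × String) :=
  hits.items.foldl (fun b cv =>
    if PySem.Str.strip cv.2 == "" then b
    else
      match CAND_INDEX.get? cv.1 with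
      | some nkpr =>
        match b.get? nkpr.1 with
        | none => b.insert nkpr.1 (nkpr.2, cv.2)
        | some pv => if nkpr.2 < pv.1 then b.insert nkpr.1 (nkpr.2, cv.2) else b
      | none => b  -- unreachable: the scan only stores CAND_INDEX keys (Python: CAND_INDEX[c])
    ) PySem.Dict.empty

def normalize_properties_alt (attrs : List (String × String)) : List (String × String) :=
  let s := npB_scan attrs
  let best := npB_best s.1
  let out0 := NORMALIZED_KEYS.foldl
    (fun out p => match best.get? p.1 with
      | some pv => out.insert p.1 pv.2
      | none => out) PySem.Dict.empty
  let out := s.2.foldl (fun out t => if out.contains t.2.1 then out else out.insert t.1 t.2.2) out0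
  out.items

-- ===== PRECONDITION & SPEC =====
-- attrs is a Python dict: association lists with duplicate keys do not represent one, so they are excluded.
def Pre_normalize_properties (attrs : List (String × String)) : Prop :=
  (attrs.map Prod.fst).Nodup
instance (attrs : List (String × String)) : Decidable (Pre_normalize_properties attrs) := by
  unfold Pre_normalize_properties; infer_instance

def pvWitness_normalize_properties : (List (String × String)) :=
  [("APN", "123"), ("Note", "hello"), ("Owner", " ")]

def Spec_normalize_properties (attrs : List (String × String)) (out : List (String × String)) : Prop := out = normalize_properties_alt attrs
instance (attrs : List (String × String)) (out : List (String × String)) : Decidable (Spec_normalize_properties attrs out) := by unfold Spec_normalize_properties; infer_instance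

-- ===== CLAIM (what is proved, stated in full; the proofs are below) =====
def Claim_equal_normalize_properties : Prop := ∀ (attrs : List (String × String)), Dom_normalize_properties attrs → Pre_normalize_properties attrs → Spec_normalize_properties attrs (normalize_properties attrs)

-- ===== LEMMAS AND PROOFS =====

-- ---- proof-side helpers ----

-- the value A's inner loop picks: first candidate whose looked-up value is non-empty
def npFirstHit (g : String → Option String) : List String → Option String
  | [] => none
  | c :: rest =>
    match g c with
    | some v => if PySem.Str.strip v ≠ "" then some v else npFirstHit g rest
    | none => npFirstHit g rest

-- merge of two priority candidates: the right one wins only if strictly smaller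
def npMo : Option (Int × String) → Option (Int × String) → Option (Int × String)
  | o, none => o
  | none, some q => some q
  | some q, some r => if r.1 < q.1 then some r else some q

-- eligibility of one hits-item for normalized key nk
def npElig (nk c v : String) : Option (Int × String) :=
  if PySem.Str.strip v == "" then none
  else (CAND_INDEX.get? c).bind (fun q => if q.1 = nk then some (q.2, v) else none)

-- the winner npB_best ends up with at key nk
def npSel (nk : String) (L : List (String × String)) : Option (Int × String) :=
  L.foldr (fun cv r => npMo (npElig nk cv.1 cv.2) r) none

def npBestStep (b : PySem.Dict String (Int × String)) (cv : String × String) :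
    PySem.Dict String (Int × String) :=
  if PySem.Str.strip cv.2 == "" then b
  else
    match CAND_INDEX.get? cv.1 with
    | some nkpr =>
      match b.get? nkpr.1 with
      | none => b.insert nkpr.1 (nkpr.2, cv.2)
      | some pv => if nkpr.2 < pv.1 then b.insert nkpr.1 (nkpr.2, cv.2) else b
    | none => b

lemma npB_best_eq (h : PySem.Dict String String) :
    npB_best h = h.items.foldl npBestStep PySem.Dict.empty := rfl

-- ---- concrete facts about the reverse index (decided once) ----

set_option maxRecDepth 100000 in
lemma npCI_at : ∀ p ∈ NORMALIZED_KEYS, ∀ i : Fin p.2.length,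
    CAND_INDEX.get? p.2[i] = some (p.1, (i : Int)) := by decide

set_option maxRecDepth 100000 in
lemma npCI_contains : ∀ p ∈ NORMALIZED_KEYS, ∀ c ∈ p.2,
    CAND_INDEX.contains c = true := by decide

set_option maxRecDepth 100000 in
lemma npCI_inj : ∀ p ∈ NORMALIZED_KEYS, ∀ e ∈ CAND_INDEX.items, e.2.1 = p.1 →
    ∃ i : Fin p.2.length, e.1 = p.2[i] ∧ e.2.2 = (i : Int) := by decide

set_option maxRecDepth 100000 in
lemma npCI_keys : CAND_INDEX.keys = NORMALIZED_KEYS.flatMap (fun p => p.2) := by decide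

-- A's flattened membership test is membership in the reverse index
lemma npF4 (s : String) :
    (NORMALIZED_KEYS.any (fun q => q.2.any (fun c => s == c)))
      = CAND_INDEX.contains s := by
  rw [PySem.Dict.contains_eq_decide_mem_keys, npCI_keys]
  by_cases hm : s ∈ NORMALIZED_KEYS.flatMap (fun p => p.2)
  · simp only [hm, decide_true]
    obtain ⟨q, hq, hc⟩ := List.mem_flatMap.mp hm
    simp only [List.any_eq_true, beq_iff_eq]
    exact ⟨q, hq, s, hc, rfl⟩
  · simp only [hm, decide_false]
    rw [List.any_eq_false]
    intro q hq
    simp only [List.any_eq_true, beq_iff_eq]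
    rintro ⟨c, hc, rfl⟩
    exact hm (List.mem_flatMap.mpr ⟨q, hq, hc⟩)

-- ---- npMo / npSel / npBest ----

lemma npMo_none_right (a : Option (Int × String)) : npMo a none = a := by
  cases a <;> rfl

lemma npMo_none_left (b : Option (Int × String)) : npMo none b = b := by
  cases b <;> rfl

lemma npMo_assoc (a b c : Option (Int × String)) :
    npMo (npMo a b) c = npMo a (npMo b c) := by
  rcases a with _ | qa
  · rw [npMo_none_left, npMo_none_left]
  rcases b with _ | qb
  · rw [npMo_none_right, npMo_none_left]
  rcases c with _ | qc
  · rw [npMo_none_right, npMo_none_right]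
  by_cases h1 : qb.1 < qa.1 <;> by_cases h2 : qc.1 < qb.1 <;>
    by_cases h3 : qc.1 < qa.1 <;>
    simp only [npMo, h1, h2, h3, if_true, if_false] <;>
    first | rfl | (exfalso; omega)

lemma npBestStep_get (b : PySem.Dict String (Int × String)) (cv : String × String)
    (nk : String) :
    (npBestStep b cv).get? nk = npMo (b.get? nk) (npElig nk cv.1 cv.2) := by
  unfold npBestStep npElig
  cases hs : (PySem.Str.strip cv.2 == "") with
  | true => simp [npMo_none_right]
  | false =>
    simp only [Bool.false_eq_true, if_false]
    cases hq : CAND_INDEX.get? cv.1 with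
    | none => simp [npMo_none_right]
    | some q =>
      simp only [Option.bind_some]
      by_cases hnk : q.1 = nk
      · subst hnk
        cases hb : b.get? q.1 with
        | none => simp [PySem.Dict.get?_insert_self, npMo]
        | some pv =>
          by_cases hlt : q.2 < pv.1
          · simp [hlt, PySem.Dict.get?_insert_self, npMo]
          · simp [hb, hlt, npMo]
      · have hne : nk ≠ q.1 := fun h => hnk h.symm
        cases hb : b.get? q.1 with
        | none => simp [PySem.Dict.get?_insert_of_ne _ _ hne, hnk, npMo_none_right]
        | some pv =>
          by_cases hlt : q.2 < pv.1
          · simp [hlt, PySem.Dict.get?_insert_of_ne _ _ hne, hnk, npMo_none_right]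
          · simp [hlt, hnk, npMo_none_right]

lemma npBest_get (L : List (String × String)) (b : PySem.Dict String (Int × String))
    (nk : String) :
    (L.foldl npBestStep b).get? nk = npMo (b.get? nk) (npSel nk L) := by
  induction L generalizing b with
  | nil => simp [npSel, npMo_none_right]
  | cons x t ih =>
    have hsel : npSel nk (x :: t) = npMo (npElig nk x.1 x.2) (npSel nk t) := rfl
    rw [List.foldl_cons, ih, npBestStep_get, npMo_assoc, ← hsel]

lemma npSel_none {nk : String} : ∀ {L : List (String × String)}, npSel nk L = none →
    ∀ cv ∈ L, npElig nk cv.1 cv.2 = none := by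
  intro L
  induction L with
  | nil => intro _ cv hcv; simp at hcv
  | cons x t ih =>
    intro h cv hcv
    have hx : npSel nk (x :: t) = npMo (npElig nk x.1 x.2) (npSel nk t) := rfl
    rw [hx] at h
    have hen : npElig nk x.1 x.2 = none ∧ npSel nk t = none := by
      rcases he : npElig nk x.1 x.2 with _ | eq
      · rcases hs : npSel nk t with _ | sq
        · exact ⟨rfl, rfl⟩
        · rw [he, hs] at h; simp [npMo] at h
      · rcases hs : npSel nk t with _ | sq
        · rw [he, hs] at h; simp [npMo] at h
        · rw [he, hs] at h; simp only [npMo] at h; split_ifs at h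
    rcases List.mem_cons.mp hcv with rfl | hcv'
    · exact hen.1
    · exact ih hen.2 cv hcv'

lemma npSel_some {nk : String} : ∀ {L : List (String × String)} {pv : Int × String},
    npSel nk L = some pv →
    (∃ cv ∈ L, npElig nk cv.1 cv.2 = some pv) ∧
      (∀ cv ∈ L, ∀ q, npElig nk cv.1 cv.2 = some q → pv.1 ≤ q.1) := by
  intro L
  induction L with
  | nil => intro pv h; simp [npSel] at h
  | cons x t ih =>
    intro pv h
    have hx : npSel nk (x :: t) = npMo (npElig nk x.1 x.2) (npSel nk t) := rfl
    rw [hx] at h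
    rcases he : npElig nk x.1 x.2 with _ | eq
    · rcases hs : npSel nk t with _ | sq
      · rw [he, hs] at h; simp [npMo] at h
      · rw [he, hs] at h
        simp only [npMo] at h
        rw [Option.some_inj] at h; subst h
        obtain ⟨⟨cv, hcv, hcve⟩, hmin⟩ := ih hs
        refine ⟨⟨cv, List.mem_cons_of_mem _ hcv, hcve⟩, ?_⟩
        intro cv' hcv' q hq
        rcases List.mem_cons.mp hcv' with rfl | hcv'
        · rw [he] at hq; simp at hq
        · exact hmin cv' hcv' q hq
    · rcases hs : npSel nk t with _ | sq
      · rw [he, hs] at h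
        simp only [npMo] at h
        rw [Option.some_inj] at h; subst h
        refine ⟨⟨x, List.mem_cons_self, he⟩, ?_⟩
        intro cv' hcv' q hq
        rcases List.mem_cons.mp hcv' with rfl | hcv'
        · rw [he] at hq; rw [Option.some_inj] at hq; subst hq; exact le_refl _
        · rw [npSel_none hs cv' hcv'] at hq; simp at hq
      · rw [he, hs] at h
        simp only [npMo] at h
        obtain ⟨⟨cv, hcv, hcve⟩, hmin⟩ := ih hs
        split_ifs at h with hlt <;> rw [Option.some_inj] at h
        · subst h
          refine ⟨⟨cv, List.mem_cons_of_mem _ hcv, hcve⟩, ?_⟩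
          intro cv' hcv' q hq
          rcases List.mem_cons.mp hcv' with rfl | hcv'
          · rw [he] at hq; rw [Option.some_inj] at hq; subst hq; omega
          · exact hmin cv' hcv' q hq
        · subst h
          refine ⟨⟨x, List.mem_cons_self, he⟩, ?_⟩
          intro cv' hcv' q hq
          rcases List.mem_cons.mp hcv' with rfl | hcv'
          · rw [he] at hq; rw [Option.some_inj] at hq; subst hq; exact le_refl _
          · have := hmin cv' hcv' q hq; omega

-- ---- npFirstHit ----

lemma npFh_congr (g g' : String → Option String) (cs : List String)
    (h : ∀ c ∈ cs, g c = g' c) : npFirstHit g cs = npFirstHit g' cs := by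
  induction cs with
  | nil => rfl
  | cons c r ih =>
    have hc := h c (List.mem_cons_self)
    have ht := ih (fun c hc => h c (List.mem_cons_of_mem _ hc))
    simp only [npFirstHit, hc, ht]

lemma npFh_none_of (g : String → Option String) (cs : List String)
    (h : ∀ c ∈ cs, ∀ w, g c = some w → PySem.Str.strip w = "") :
    npFirstHit g cs = none := by
  induction cs with
  | nil => rfl
  | cons c r ih =>
    have ht := ih (fun c hc => h c (List.mem_cons_of_mem _ hc))
    cases hg : g c with
    | none => simp [npFirstHit, hg, ht]
    | some w =>
      have hw := h c (List.mem_cons_self) w hg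
      simp [npFirstHit, hg, hw, ht]

lemma npFh_some_of (g : String → Option String) :
    ∀ (cs : List String) (i : Nat) (h : i < cs.length) (v : String),
      g cs[i] = some v → PySem.Str.strip v ≠ "" →
      (∀ j (hj : j < cs.length), j < i → ∀ w, g cs[j] = some w → PySem.Str.strip w = "") →
      npFirstHit g cs = some v := by
  intro cs
  induction cs with
  | nil => intro i h; simp at h
  | cons c r ih =>
    intro i h v hg hne hmin
    cases i with
    | zero =>
      simp only [List.getElem_cons_zero] at hg
      simp [npFirstHit, hg, hne]
    | succ n =>
      have hstep : npFirstHit g (c :: r) = npFirstHit g r := by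
        cases hgc : g c with
        | none => simp [npFirstHit, hgc]
        | some w =>
          have hw := hmin 0 (by omega) (by omega) w (by simpa using hgc)
          simp [npFirstHit, hgc, hw]
      rw [hstep]
      refine ih n (by simpa using h) v (by simpa using hg) hne ?_
      intro j hj hji w hgw
      exact hmin (j + 1) (by simpa using Nat.succ_lt_succ hj) (by omega) w
        (by simpa using hgw)

-- ---- per-normalized-key equivalence ----

set_option maxRecDepth 100000 in
lemma np_pernk (h : PySem.Dict String String) (hnd : h.keys.Nodup)
    (nk : String) (cs : List String) (hmem : (nk, cs) ∈ NORMALIZED_KEYS) :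
    (npSel nk h.items).map (fun pv => pv.2) = npFirstHit (fun c => h.get? c) cs := by
  have hciAt : ∀ (j : Nat) (hj : j < cs.length),
      CAND_INDEX.get? (cs[j]'hj) = some (nk, (j : Int)) :=
    fun j hj => by simpa using npCI_at (nk, cs) hmem ⟨j, hj⟩
  rcases hsel : npSel nk h.items with _ | pv
  · symm
    apply npFh_none_of
    intro c hc w hgw
    by_contra hwne
    have hmemit : (c, w) ∈ h.items := PySem.Dict.mem_items_of_get?_eq_some _ hgw
    have hnone := npSel_none hsel (c, w) hmemit
    obtain ⟨i, hi, rfl⟩ := List.mem_iff_getElem.mp hc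
    rw [npElig, hciAt i hi] at hnone
    rw [if_neg (by simpa using hwne)] at hnone
    simp at hnone
  · obtain ⟨⟨cv, hcvmem, helig⟩, hminall⟩ := npSel_some hsel
    have hun : PySem.Str.strip cv.2 ≠ "" ∧ CAND_INDEX.get? cv.1 = some (nk, pv.1) ∧
        pv.2 = cv.2 := by
      rw [npElig] at helig
      by_cases hstrip : (PySem.Str.strip cv.2 == "") = true
      · rw [if_pos hstrip] at helig; simp at helig
      · rw [if_neg hstrip] at helig
        rcases hq : CAND_INDEX.get? cv.1 with _ | q
        · rw [hq] at helig; simp at helig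
        · rw [hq, Option.bind_some] at helig
          by_cases hnk : q.1 = nk
          · rw [if_pos hnk] at helig
            have hpair := Option.some_inj.mp helig
            subst hpair
            refine ⟨by simpa using hstrip, congrArg some ?_, rfl⟩
            obtain ⟨q1, q2⟩ := q
            simp only at hnk
            rw [hnk]
          · rw [if_neg hnk] at helig; simp at helig
    obtain ⟨hne, hci, hv2⟩ := hun
    have hmemCI := PySem.Dict.mem_items_of_get?_eq_some _ hci
    obtain ⟨i, hceq0, hpeq0⟩ := npCI_inj (nk, cs) hmem (cv.1, (nk, pv.1)) hmemCI rfl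
    have hii : (i : Nat) < cs.length := i.2
    have hceq : cv.1 = cs[(i : Nat)] := by simpa using hceq0
    have hpeq : pv.1 = ((i : Nat) : Int) := by simpa using hpeq0
    have hg : h.get? cs[(i : Nat)] = some cv.2 := by
      rw [← hceq]; exact PySem.Dict.get?_of_mem_items _ hcvmem hnd
    rw [Option.map_some, hv2]
    symm
    apply npFh_some_of (fun c => h.get? c) cs (i : Nat) hii cv.2 hg hne
    intro j hj hji w hgw
    by_contra hwne
    have hmemit : (cs[j], w) ∈ h.items := PySem.Dict.mem_items_of_get?_eq_some _ hgw
    have heligJ : npElig nk cs[j] w = some ((j : Int), w) := by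
      rw [npElig, hciAt j hj]
      rw [if_neg (by simpa using hwne)]
      simp
    have hle : pv.1 ≤ ((j : Int), w).1 := hminall (cs[j], w) hmemit ((j : Int), w) heligJ
    have hle' : pv.1 ≤ (j : Int) := hle
    omega

-- ---- A's inner loop as npFirstHit ----

lemma np_try_eq (lm da : PySem.Dict String String) (nk : String)
    (out : PySem.Dict String String) (cs : List String) :
    np_try lm da nk out cs =
      match npFirstHit (fun c => (lm.get? c).bind (fun k => da.get? k)) cs with
      | some v => out.insert nk v
      | none => out := by
  induction cs with
  | nil => rfl
  | cons c r ih =>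
    cases hl : lm.get? c with
    | none => simp only [np_try, npFirstHit, hl, Option.bind]; exact ih
    | some orig =>
      cases hd : da.get? orig with
      | none => simp only [np_try, npFirstHit, hl, hd, Option.bind]; exact ih
      | some val =>
        by_cases hv : PySem.Str.strip val ≠ ""
        · simp only [np_try, npFirstHit, hl, hd, Option.bind, if_pos hv]
        · simp only [np_try, npFirstHit, hl, hd, Option.bind, if_neg hv]; exact ih

-- ---- scan / lower_map ----

lemma npScan_append (as : List (String × String)) (p : String × String) :
    npB_scan (as ++ [p]) =
      (if CAND_INDEX.contains (PySem.Str.lower p.1) then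
        ((npB_scan as).1.insert (PySem.Str.lower p.1) p.2, (npB_scan as).2)
      else if PySem.Str.strip p.2 ≠ "" then
        ((npB_scan as).1, (npB_scan as).2 ++ [(p.1, PySem.Str.lower p.1, p.2)])
      else npB_scan as) := by
  simp [npB_scan, List.foldl_append]

lemma npScan_keys_nodup (attrs : List (String × String)) :
    (npB_scan attrs).1.keys.Nodup := by
  induction attrs using List.reverseRecOn with
  | nil => exact PySem.Dict.nodup_keys_empty
  | append_singleton as p ih =>
    rw [npScan_append]
    split_ifs
    · exact PySem.Dict.nodup_keys_insert _ _ _ ih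
    · exact ih
    · exact ih

lemma npLower_append (as : List (String × String)) (p : String × String) :
    np_lowerMap (as ++ [p]) = (np_lowerMap as).insert (PySem.Str.lower p.1) p.1 := by
  simp [np_lowerMap, List.foldl_append]

lemma npLower_mem (attrs : List (String × String)) (c k : String)
    (h : (np_lowerMap attrs).get? c = some k) : k ∈ attrs.map Prod.fst := by
  induction attrs using List.reverseRecOn with
  | nil => simp [np_lowerMap, PySem.Dict.get?_empty] at h
  | append_singleton as p ih =>
    rw [npLower_append, PySem.Dict.get?_insert] at h
    rw [List.map_append]
    split_ifs at h with hc
    · rw [Option.some_inj] at h; subst h; simp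
    · exact List.mem_append_left _ (ih h)

lemma npMkGet_append (L : List (String × String)) (p : String × String) (k : String) :
    (PySem.Dict.mk (L ++ [p])).get? k =
      ((PySem.Dict.mk L).get? k).or (if p.1 == k then some p.2 else none) := by
  obtain ⟨pk, pw⟩ := p
  induction L with
  | nil =>
    rw [List.nil_append, PySem.Dict.get?_mk_cons]
    by_cases hpk : (pk == k) = true
    · rw [if_pos hpk, if_pos hpk]
      rfl
    · rw [if_neg hpk, if_neg hpk]
      rfl
  | cons x t ih =>
    obtain ⟨xk, xw⟩ := x
    rw [List.cons_append, PySem.Dict.get?_mk_cons, PySem.Dict.get?_mk_cons, ih]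
    by_cases hxk : (xk == k) = true
    · rw [if_pos hxk, if_pos hxk]
      rfl
    · rw [if_neg hxk, if_neg hxk]

lemma npMkGet_none (L : List (String × String)) (k : String)
    (h : k ∉ L.map Prod.fst) : (PySem.Dict.mk L).get? k = none := by
  rw [PySem.Dict.get?_eq_none_iff_not_mem_keys]
  simpa [PySem.Dict.keys_mk] using h

lemma npMkGet_isSome (L : List (String × String)) (k : String)
    (hnd : (L.map Prod.fst).Nodup) (h : k ∈ L.map Prod.fst) :
    ∃ v, (PySem.Dict.mk L).get? k = some v := by
  obtain ⟨⟨k', v⟩, hm, rfl⟩ := List.mem_map.mp h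
  exact ⟨v, PySem.Dict.get?_of_mem_items _ hm (by simpa [PySem.Dict.keys_mk] using hnd)⟩

lemma npL1 (attrs : List (String × String)) (hnd : (attrs.map Prod.fst).Nodup)
    (c : String) (hc : CAND_INDEX.contains c = true) :
    (npB_scan attrs).1.get? c =
      ((np_lowerMap attrs).get? c).bind (fun k => (PySem.Dict.mk attrs).get? k) := by
  induction attrs using List.reverseRecOn with
  | nil => rfl
  | append_singleton as p ih =>
    have hnd2 : (as.map Prod.fst).Nodup ∧ p.1 ∉ as.map Prod.fst := by
      rw [List.map_append] at hnd
      have h2 := List.nodup_append.mp hnd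
      exact ⟨h2.1, fun hm => h2.2.2 p.1 hm p.1 (by simp) rfl⟩
    rw [npScan_append, npLower_append]
    by_cases hck : c = PySem.Str.lower p.1
    · subst hck
      rw [if_pos hc]
      simp only [PySem.Dict.get?_insert_self, Option.bind]
      rw [npMkGet_append, npMkGet_none as p.1 hnd2.2]
      simp
    · have hg1 : ∀ d : PySem.Dict String String,
          (d.insert (PySem.Str.lower p.1) p.2).get? c = d.get? c :=
        fun d => PySem.Dict.get?_insert_of_ne _ _ hck
      have hg2 : ((np_lowerMap as).insert (PySem.Str.lower p.1) p.1).get? c =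
          (np_lowerMap as).get? c := PySem.Dict.get?_insert_of_ne _ _ hck
      have hbind : ((np_lowerMap as).get? c).bind (fun k => (PySem.Dict.mk (as ++ [p])).get? k)
          = ((np_lowerMap as).get? c).bind (fun k => (PySem.Dict.mk as).get? k) := by
        cases hlk : (np_lowerMap as).get? c with
        | none => rfl
        | some k =>
          simp only [Option.bind]
          obtain ⟨v, hv⟩ := npMkGet_isSome as k hnd2.1 (npLower_mem as c k hlk)
          rw [npMkGet_append, hv]
          rfl
      rw [hg2, hbind]
      split_ifs with h1 h2
      · rw [hg1]; exact ih hnd2.1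
      · exact ih hnd2.1
      · exact ih hnd2.1

-- ---- phase 2 ----

lemma npPh2 (attrs : List (String × String)) (out : PySem.Dict String String) :
    attrs.foldl (fun out p =>
      if PySem.Str.strip p.2 == "" then out
      else
        let kl := PySem.Str.lower p.1
        if NORMALIZED_KEYS.any (fun q => q.2.any (fun c => kl == c)) then out
        else if out.contains kl then out
        else out.insert p.1 p.2) out
    = (npB_scan attrs).2.foldl
        (fun out t => if out.contains t.2.1 then out else out.insert t.1 t.2.2) out := by
  induction attrs using List.reverseRecOn with
  | nil => rfl
  | append_singleton as p ih =>
    rw [List.foldl_append, npScan_append, ih]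
    cases hs : (PySem.Str.strip p.2 == "") with
    | true =>
      have hns : ¬ PySem.Str.strip p.2 ≠ "" := by simpa using hs
      simp only [List.foldl_cons, List.foldl_nil, hs, if_true, if_neg hns]
      split_ifs <;> rfl
    | false =>
      have hstr : PySem.Str.strip p.2 ≠ "" := by simpa using hs
      simp only [List.foldl_cons, List.foldl_nil, hs, Bool.false_eq_true, if_false]
      rw [npF4 (PySem.Str.lower p.1)]
      cases hct : CAND_INDEX.contains (PySem.Str.lower p.1) with
      | true => simp
      | false =>
        simp only [Bool.false_eq_true, if_false, if_pos hstr, List.foldl_append,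
          List.foldl_cons, List.foldl_nil]

-- ===== VERDICT (by name: the statement is the Claim_ definition above) =====
theorem normalize_properties_spec : Claim_equal_normalize_properties := by
  intro attrs hdom hpre
  unfold Spec_normalize_properties
  by_cases hnil : attrs = []
  · subst hnil; rfl
  · have hAllC : ∀ p ∈ NORMALIZED_KEYS, ∀ c ∈ p.2, CAND_INDEX.contains c = true :=
      npCI_contains
    simp only [normalize_properties, normalize_properties_alt, if_neg hnil]
    have hout : NORMALIZED_KEYS.foldl
        (fun out p => np_try (np_lowerMap attrs) (PySem.Dict.mk attrs) p.1 out p.2)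
        PySem.Dict.empty
        = NORMALIZED_KEYS.foldl
          (fun out p => match (npB_best (npB_scan attrs).1).get? p.1 with
            | some pv => out.insert p.1 pv.2
            | none => out) PySem.Dict.empty := by
      apply PySem.List.foldl_congr_mem
      intro acc p hp
      rw [np_try_eq]
      have hc1 : ∀ c ∈ p.2, ((np_lowerMap attrs).get? c).bind
          (fun k => (PySem.Dict.mk attrs).get? k) = (npB_scan attrs).1.get? c :=
        fun c hc => (npL1 attrs hpre c (hAllC p hp c hc)).symm
      rw [npFh_congr _ _ _ hc1]
      have hpmem : (p.1, p.2) ∈ NORMALIZED_KEYS := by cases p; exact hp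
      rw [← np_pernk (npB_scan attrs).1 (npScan_keys_nodup attrs) p.1 p.2 hpmem]
      have hbg : (npB_best (npB_scan attrs).1).get? p.1 =
          npSel p.1 (npB_scan attrs).1.items := by
        rw [npB_best_eq, npBest_get, PySem.Dict.get?_empty, npMo_none_left]
      rw [hbg]
      cases npSel p.1 (npB_scan attrs).1.items <;> rfl
    rw [npPh2, hout]
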